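-- pv_equiv track=rewrite | github.com/sakshi13-m/google-kickstart | round H/Boring num.py | f
-- ===== SOURCE A (Python) =====
-- def digit(n):
--     l=[]
--     count=0
--     while(n>0):
--         l.append(n%10)
--         n=n//10
--         count+=1
--     l.append(count)
--     l.reverse()
--     return l
--
-- def f(x):
--     if(x==0):
--         return 0
--     l=digit(x)
--     count=l[0]
--     l.pop(0)
--     if(count==1):
--         re=0
--     else:
--         re=pow(5,count)
--         re-=1
--         re=re//4
--         re-=1
--     z=len(l)
--     idx=1
--     for i in range(z):
--         if(i%2==0):
--             if(l[i]%2):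
--                 ok=(l[i])//2
--                 re+=(ok)*(pow(5,z-i-1))
--             else:
--                 ok=l[i]//2
--                 re+=(ok)*(pow(5,z-i-1))
--                 idx=0
--                 break
--         else:
--             if(l[i]%2==0):
--                 ok=(l[i]+1)//2
--                 re+=(ok)*(pow(5,z-i-1))
--             else:
--                 ok=(l[i]+1)//2
--                 re+=(ok)*(pow(5,z-i-1))
--                 idx=0
--                 break
--     re+=idx
--     return re
-- ===== SOURCE B (Python) =====
-- # B: rank-based counter. A boring number's digits are each one of 5 allowed
-- # values per position, so boring numbers of length D biject with base-5 words;
-- # f(x) = (count of shorter boring numbers, summed per length) + (rank of x's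
-- # digit word among length-D boring words), computed by recursion on the digits.
--
-- def _digits(n):
--     # most-significant-first digit list of n (empty for n <= 0)
--     if n > 0:
--         return _digits(n // 10) + [n % 10]
--     return []
--
-- def _rank(ds, odd):
--     # 1 + number of boring digit-words (of this length, starting at a position
--     # of parity `odd`) strictly below ds; drops the +1 once ds leaves the set.
--     if not ds:
--         return 1
--     d, rest = ds[0], ds[1:]
--     w = 5 ** len(rest)
--     allowed = (1, 3, 5, 7, 9) if odd else (0, 2, 4, 6, 8)
--     smaller = sum(1 for a in allowed if a < d)
--     if d in allowed:
--         return smaller * w + _rank(rest, not odd)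
--     return smaller * w
--
-- def f(x):
--     if x <= 0:
--         return 0
--     ds = _digits(x)
--     total = 0
--     for d in range(1, len(ds)):
--         total += 5 ** d
--     return total + _rank(ds, True)
-- ===== Notes on version B (the rewrite author's own statement) =====
-- stated objective: alternative
-- what changed: Replaces A's closed-form geometric sum plus index-loop-with-break digit scan by a rank computation: shorter lengths are summed with an explicit loop, and the rank of x among boring digit-words is computed by structural recursion on the digit list with a parity flag, counting allowed digits below each digit instead of A's //2 arithmetic.
import Mathlib
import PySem

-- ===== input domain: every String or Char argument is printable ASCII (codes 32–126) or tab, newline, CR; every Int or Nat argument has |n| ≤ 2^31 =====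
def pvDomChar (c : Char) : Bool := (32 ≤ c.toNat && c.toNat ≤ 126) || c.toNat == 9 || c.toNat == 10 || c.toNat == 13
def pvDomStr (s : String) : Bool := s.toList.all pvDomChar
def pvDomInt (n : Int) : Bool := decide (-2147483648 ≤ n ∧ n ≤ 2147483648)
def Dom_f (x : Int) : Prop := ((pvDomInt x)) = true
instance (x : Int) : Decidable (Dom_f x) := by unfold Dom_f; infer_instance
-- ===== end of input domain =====

-- B ranks x among boring digit-words by recursion on its digits instead of A's
-- closed-form geometric sum plus break-loop scan; same cost, different algorithm.

-- ===== PORT A =====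
-- the while loop of digit(): l collects n%10, count counts digits
def digitLoop (n : Int) (l : List Int) (count : Int) : List Int × Int :=
  if _h : 0 < n then
    digitLoop (PySem.Int.floordiv n 10) (l ++ [PySem.Int.mod n 10]) (count + 1)
  else
    (l, count)
termination_by n.toNat
decreasing_by
  rw [PySem.Int.floordiv_eq_ediv_of_pos (by norm_num)]; omega

def digit (n : Int) : List Int :=
  let (l, count) := digitLoop n [] 0
  (l ++ [count]).reverse

-- A's 'for i in range(z)' loop with break: walks the digit list carrying i;
-- returns (re, idx).  pow(5, z-i-1) is ported as 5 ^ (z-i-1).toNat (the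
-- exponent is always ≥ 0 on reachable states, where it is exact).
def fScan (ds : List Int) (i z re : Int) : Int × Int :=
  match ds with
  | [] => (re, 1)
  | d :: rest =>
    if PySem.Int.mod i 2 = 0 then
      if ¬ PySem.Int.mod d 2 = 0 then
        fScan rest (i + 1) z (re + PySem.Int.floordiv d 2 * 5 ^ (z - i - 1).toNat)
      else
        (re + PySem.Int.floordiv d 2 * 5 ^ (z - i - 1).toNat, 0)
    else
      if PySem.Int.mod d 2 = 0 then
        fScan rest (i + 1) z (re + PySem.Int.floordiv (d + 1) 2 * 5 ^ (z - i - 1).toNat)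
      else
        (re + PySem.Int.floordiv (d + 1) 2 * 5 ^ (z - i - 1).toNat, 0)

def f (x : Int) : Int :=
  if x = 0 then 0
  else
    let l0 := digit x
    let count := l0.headD 0          -- l[0]; digit always returns a nonempty list
    let l := l0.tail                 -- l.pop(0)
    let re : Int :=
      if count = 1 then 0
      else PySem.Int.floordiv (5 ^ count.toNat - 1) 4 - 1   -- pow(5,count); count ≥ 0 always
    let z : Int := l.length
    let p := fScan l 0 z re   -- (re, idx) after the loop
    p.1 + p.2

-- ===== PORT B =====
-- most-significant-first digit list of n (empty for n ≤ 0)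
def digitsB (n : Int) : List Int :=
  if _h : 0 < n then
    digitsB (PySem.Int.floordiv n 10) ++ [PySem.Int.mod n 10]
  else
    []
termination_by n.toNat
decreasing_by
  rw [PySem.Int.floordiv_eq_ediv_of_pos (by norm_num)]; omega

-- 1 + number of boring digit-words strictly below ds; drops the +1 once ds leaves the set
def rankB (ds : List Int) (odd : Bool) : Int :=
  match ds with
  | [] => 1
  | d :: rest =>
    let w : Int := 5 ^ rest.length
    let allowed : List Int := if odd then [1, 3, 5, 7, 9] else [0, 2, 4, 6, 8]
    let smaller : Int := ((allowed.filter (fun a => a < d)).length : Int)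
    if allowed.contains d then smaller * w + rankB rest (!odd) else smaller * w

def f_alt (x : Int) : Int :=
  if x ≤ 0 then 0
  else
    let ds := digitsB x
    let total := (PySem.List.pyRange 1 (ds.length : Int) 1).foldl
      (fun (acc : Int) d => acc + 5 ^ d.toNat) 0
    total + rankB ds true

-- ===== PRECONDITION & SPEC =====
def Spec_f (x : Int) (out : Int) : Prop := out = f_alt x
instance (x : Int) (out : Int) : Decidable (Spec_f x out) := by unfold Spec_f; infer_instance

-- ===== CLAIM (what is proved, stated in full; the proofs are below) =====
def Claim_equal_f : Prop := ∀ (x : Int), Dom_f x → Spec_f x (f x)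

-- ===== LEMMAS AND PROOFS =====

-- digits produced by digitsB are in [0, 10)
lemma digitsB_bounds : ∀ (n : Int), ∀ d ∈ digitsB n, 0 ≤ d ∧ d < 10 := by
  intro n
  fun_induction digitsB n with
  | case1 n h ih =>
    intro d hd
    rw [List.mem_append] at hd
    rcases hd with hd | hd
    · exact ih d hd
    · simp only [List.mem_singleton] at hd
      subst hd
      rw [PySem.Int.mod_eq_emod_of_pos (by norm_num)]
      omega
  | case2 n _h => intro d hd; simp at hd

-- the while loop of digit() builds digitsB reversed and counts its length
lemma digitLoop_eq : ∀ (n : Int) (l : List Int) (c : Int),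
    digitLoop n l c = (l ++ (digitsB n).reverse, c + (digitsB n).length) := by
  intro n
  fun_induction digitsB n with
  | case1 n h ih =>
    intro l c
    rw [digitLoop, dif_pos h, ih]
    simp
    omega
  | case2 n hn =>
    intro l c
    rw [digitLoop, dif_neg hn]
    simp

lemma digit_eq (n : Int) :
    digit n = ((digitsB n).length : Int) :: digitsB n := by
  simp [digit, digitLoop_eq]

-- per-digit facts, odd position: A's d//2 is B's count of odd digits below d,
-- and the break condition matches membership in {1,3,5,7,9}
lemma digit_odd_pos (d : Int) (h0 : 0 ≤ d) (h1 : d < 10) :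
    PySem.Int.floordiv d 2 = ((([1, 3, 5, 7, 9] : List Int).filter (fun a => a < d)).length : Int)
    ∧ ((¬ PySem.Int.mod d 2 = 0) ↔ ([1, 3, 5, 7, 9] : List Int).contains d = true) := by
  interval_cases d <;> exact ⟨by decide, by decide⟩

-- per-digit facts, even position
lemma digit_even_pos (d : Int) (h0 : 0 ≤ d) (h1 : d < 10) :
    PySem.Int.floordiv (d + 1) 2 = ((([0, 2, 4, 6, 8] : List Int).filter (fun a => a < d)).length : Int)
    ∧ ((PySem.Int.mod d 2 = 0) ↔ ([0, 2, 4, 6, 8] : List Int).contains d = true) := by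
  interval_cases d <;> exact ⟨by decide, by decide⟩

-- A's scan (plus the final idx) computes re + B's rank
lemma fScan_eq_rankB : ∀ (ds : List Int) (i z re : Int), 0 ≤ i →
    z = i + ds.length →
    (∀ d ∈ ds, 0 ≤ d ∧ d < 10) →
    (fScan ds i z re).1 + (fScan ds i z re).2
      = re + rankB ds (decide (PySem.Int.mod i 2 = 0)) := by
  intro ds
  induction ds with
  | nil => intro i z re _ _ _; simp [fScan, rankB]
  | cons d rest ih =>
    intro i z re hi hz hb
    have hd := hb d (List.mem_cons_self ..)
    have hrest : ∀ e ∈ rest, 0 ≤ e ∧ e < 10 := fun e he => hb e (List.mem_cons_of_mem _ he)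
    have hw : (z - i - 1).toNat = rest.length := by
      simp only [List.length_cons] at hz; omega
    by_cases hp : PySem.Int.mod i 2 = 0
    · -- odd (1-indexed) position
      obtain ⟨hfd, hmem⟩ := digit_odd_pos d hd.1 hd.2
      rw [decide_eq_true hp]
      by_cases hodd : PySem.Int.mod d 2 = 0
      · -- break
        have hnm : ([1, 3, 5, 7, 9] : List Int).contains d = false := by
          rcases hc : ([1, 3, 5, 7, 9] : List Int).contains d with _ | _
          · rfl
          · exact absurd (hmem.mpr hc) (not_not_intro hodd)
        simp only [fScan, if_pos hp, if_neg (not_not_intro hodd)]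
        simp only [rankB, if_true, hnm, Bool.false_eq_true, if_false, hw, hfd]
        ring
      · -- continue
        have hm : ([1, 3, 5, 7, 9] : List Int).contains d = true := hmem.mp hodd
        have hIH := ih (i + 1) z (re + PySem.Int.floordiv d 2 * 5 ^ (z - i - 1).toNat)
          (by omega) (by simp only [List.length_cons] at hz ⊢; omega) hrest
        have hflip : ¬ PySem.Int.mod (i + 1) 2 = 0 := by
          rw [PySem.Int.mod_eq_emod_of_pos (by norm_num : (0:Int) < 2)] at hp ⊢; omega
        simp only [fScan, if_pos hp, if_pos hodd]
        rw [hIH, decide_eq_false hflip]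
        simp only [rankB, if_true, hm, if_true, hw, hfd, Bool.not_true]
        ring
    · -- even (1-indexed) position
      obtain ⟨hfd, hmem⟩ := digit_even_pos d hd.1 hd.2
      rw [decide_eq_false hp]
      by_cases heven : PySem.Int.mod d 2 = 0
      · -- continue
        have hm : ([0, 2, 4, 6, 8] : List Int).contains d = true := hmem.mp heven
        have hIH := ih (i + 1) z (re + PySem.Int.floordiv (d + 1) 2 * 5 ^ (z - i - 1).toNat)
          (by omega) (by simp only [List.length_cons] at hz ⊢; omega) hrest
        have hflip : PySem.Int.mod (i + 1) 2 = 0 := by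
          rw [PySem.Int.mod_eq_emod_of_pos (by norm_num : (0:Int) < 2)] at hp ⊢; omega
        simp only [fScan, if_neg hp, if_pos heven]
        rw [hIH, decide_eq_true hflip]
        simp only [rankB, Bool.false_eq_true, if_false, hm, if_true, hw, hfd, Bool.not_false]
        ring
      · -- break
        have hnm : ([0, 2, 4, 6, 8] : List Int).contains d = false := by
          rcases hc : ([0, 2, 4, 6, 8] : List Int).contains d with _ | _
          · rfl
          · exact absurd (hmem.mpr hc) heven
        simp only [fScan, if_neg hp, if_neg heven]
        simp only [rankB, Bool.false_eq_true, if_false, hnm, hw, hfd]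
        ring

-- B's loop over range(1, D) sums the geometric series: 4·S = 5^D − 5 for D ≥ 1
lemma sum_pows : ∀ (D : Nat), 1 ≤ D →
    4 * ((PySem.List.pyRange 1 (D : Int) 1).foldl (fun (acc : Int) d => acc + 5 ^ d.toNat) 0)
      = 5 ^ D - 5 := by
  intro D
  induction D with
  | zero => intro h; omega
  | succ D ih =>
    intro _
    by_cases hD : 1 ≤ D
    · have hsplit : PySem.List.pyRange 1 ((D + 1 : Nat) : Int) 1
          = PySem.List.pyRange 1 (D : Int) 1 ++ [(D : Int)] := by
        push_cast
        exact PySem.List.pyRange_one_succ_right (by exact_mod_cast hD)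
      rw [hsplit, List.foldl_append]
      simp only [List.foldl]
      rw [Int.toNat_natCast]
      have h4 := ih hD
      rw [pow_succ]
      omega
    · have hD0 : D = 0 := by omega
      subst hD0
      norm_num [PySem.List.pyRange_one_eq_nil]

-- A's closed-form prefix equals B's summed prefix (for D ≥ 1)
lemma prefix_eq (D : Nat) (hD : 1 ≤ D) :
    PySem.Int.floordiv (5 ^ D - 1) 4 - 1
      = (PySem.List.pyRange 1 (D : Int) 1).foldl (fun (acc : Int) d => acc + 5 ^ d.toNat) 0 := by
  have hs := sum_pows D hD
  set S := (PySem.List.pyRange 1 (D : Int) 1).foldl (fun (acc : Int) d => acc + 5 ^ d.toNat) 0 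
  have h5 : (5 : Int) ^ D - 1 = (S + 1) * 4 := by omega
  have h2 : PySem.Int.floordiv ((S + 1) * 4) 4 = S + 1 :=
    (PySem.Int.floordiv_eq_iff_of_pos (by norm_num)).mpr ⟨by omega, by omega⟩
  rw [h5, h2]
  omega

-- ===== VERDICT (by name: the statement is the Claim_ definition above) =====
theorem f_spec : Claim_equal_f := by
  intro x _
  unfold Spec_f f f_alt
  by_cases hx : x ≤ 0
  · -- A: digitsB x = [], the whole computation collapses to 0
    have hdig : digitsB x = [] := by rw [digitsB, dif_neg (by omega)]
    by_cases h0 : x = 0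
    · simp [h0]
    · rw [if_neg h0, if_pos hx, digit_eq, hdig]
      simp [fScan, PySem.Int.floordiv]
  · have hpos : 0 < x := by omega
    have hne : digitsB x ≠ [] := by
      rw [digitsB, dif_pos hpos]; simp
    have hD1 : 1 ≤ (digitsB x).length := List.length_pos_iff.mpr hne
    rw [if_neg (by omega : ¬ x = 0), if_neg hx, digit_eq]
    simp only [List.headD_cons, List.tail_cons]
    have hscan := fScan_eq_rankB (digitsB x) 0 ((digitsB x).length : Int)
      (if ((digitsB x).length : Int) = 1 then (0 : Int)
       else PySem.Int.floordiv (5 ^ ((digitsB x).length : Int).toNat - 1) 4 - 1)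
      le_rfl (by simp) (digitsB_bounds x)
    rw [decide_eq_true (show PySem.Int.mod 0 2 = 0 by decide)] at hscan
    have hre : (if ((digitsB x).length : Int) = 1 then (0 : Int)
        else PySem.Int.floordiv (5 ^ ((digitsB x).length : Int).toNat - 1) 4 - 1)
        = (PySem.List.pyRange 1 ((digitsB x).length : Int) 1).foldl
            (fun (acc : Int) d => acc + 5 ^ d.toNat) 0 := by
      by_cases h1 : (digitsB x).length = 1
      · rw [if_pos (by exact_mod_cast h1), h1]
        norm_num [PySem.List.pyRange_one_eq_nil]
      · rw [if_neg (by exact_mod_cast h1), Int.toNat_natCast]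
        exact prefix_eq (digitsB x).length hD1
    rw [hscan, hre]
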